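-- pv_equiv track=rewrite | github.com/LucksLab/spats | segments/diagram.py | _placeOn
-- ===== SOURCE A (Python) =====
-- def _placeOn(txt, base, loc):
--     if loc > len(base):
--         res = base + (' ' * (loc - len(base))) + txt
--     else:
--         def chmerge(t, b):
--             if t not in ' _':
--                 return t
--             elif b not in ' _':
--                 return b
--             elif t == '_' or b == '_':
--                 return '_'
--             return ' '
--         merged = ''.join([ chmerge(t, b) for t, b in zip(txt, base[loc:loc + len(txt)] + ' ' * len(txt)) ])
--         res = base[:loc] + merged + base[loc + len(txt):]
--     return res
-- ===== SOURCE B (Python) =====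
-- def _placeOn(txt, base, loc):
--     def chmerge(t, b):
--         if t not in ' _':
--             return t
--         elif b not in ' _':
--             return b
--         elif t == '_' or b == '_':
--             return '_'
--         return ' '
--     chars = list(base)
--     if len(chars) < loc + len(txt):
--         chars.extend(' ' * (loc + len(txt) - len(chars)))
--     j = loc
--     for t in txt:
--         chars[j] = chmerge(t, chars[j])
--         j += 1
--     return ''.join(chars)
-- ===== Notes on version B (the rewrite author's own statement) =====
-- stated objective: simpler
-- what changed: Replaces A's two-way branch (concatenation when loc > len(base), else slice/zip/merge/reassemble) by one uniform pass: pad a mutable char list with spaces and overlay every txt character in place with chmerge, exploiting chmerge(t,' ') == t.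
-- outside the precondition, e.g. on _placeOn('xy', 'abcd', -2): A returns 'abxyabcd', B returns 'abxy'; on _placeOn('xy', 'a', -5): A returns 'xya', B raises IndexError
import Mathlib
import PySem

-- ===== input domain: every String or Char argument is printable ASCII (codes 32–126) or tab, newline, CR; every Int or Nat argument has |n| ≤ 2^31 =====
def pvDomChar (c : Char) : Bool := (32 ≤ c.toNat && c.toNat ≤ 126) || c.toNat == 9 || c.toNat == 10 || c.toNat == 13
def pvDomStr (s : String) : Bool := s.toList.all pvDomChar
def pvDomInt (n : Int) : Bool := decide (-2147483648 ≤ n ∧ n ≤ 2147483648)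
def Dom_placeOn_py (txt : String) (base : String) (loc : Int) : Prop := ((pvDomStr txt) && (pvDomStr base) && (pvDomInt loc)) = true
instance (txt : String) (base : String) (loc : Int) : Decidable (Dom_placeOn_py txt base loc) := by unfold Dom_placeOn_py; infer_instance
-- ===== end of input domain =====

-- B replaces A's two-way branch (concat vs slice/zip/merge) by one uniform padded-overlay pass over a char list; objective: simpler.
-- Pre_ excludes negative loc, where A's returned value is an artefact of Python's negative-slice clamping and B's
-- natural list-index overlay raises or writes from the end of the list instead.


-- ===== PORT A =====
-- chmerge, shared helper of both Pythons (B keeps A's helper verbatim)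
def chmerge (t b : Char) : Char :=
  if ¬ (t = ' ' ∨ t = '_') then t
  else if ¬ (b = ' ' ∨ b = '_') then b
  else if t = '_' ∨ b = '_' then '_'
  else ' '

def placeOn_py (txt : String) (base : String) (loc : Int) : String :=
  if loc > (base.toList.length : Int) then
    String.ofList (base.toList ++ PySem.List.pyRepeat [' '] (loc - (base.toList.length : Int)) ++ txt.toList)
  else
    let merged :=
      (txt.toList.zip
        (PySem.List.slice base.toList (some loc) (some (loc + (txt.toList.length : Int)))
          ++ PySem.List.pyRepeat [' '] (txt.toList.length : Int))).map (fun p => chmerge p.1 p.2)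
    String.ofList (PySem.List.slice base.toList none (some loc) ++ merged
      ++ PySem.List.slice base.toList (some (loc + (txt.toList.length : Int))) none)

-- ===== PORT B =====
-- chars[j] = v with Python index semantics (negative wraps); hand-ported, exact for -len(cs) ≤ j < len(cs),
-- which is the only case reached under Pre_ (there 0 ≤ j < len(cs)).
def pySetIdx (cs : List Char) (j : Int) (v : Char) : List Char :=
  if 0 ≤ j then cs.set j.toNat v else cs.set ((cs.length : Int) + j).toNat v

-- the 'for t in txt' loop of Source B, carrying the running index j
def overlayGo : List Char → List Char → Int → List Char
  | cs, [], _ => cs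
  | cs, t :: ts, j => overlayGo (pySetIdx cs j (chmerge t (PySem.List.pyGetD cs j ' '))) ts (j + 1)

def placeOn_py_alt (txt : String) (base : String) (loc : Int) : String :=
  let chars := base.toList
  let chars :=
    if (chars.length : Int) < loc + (txt.toList.length : Int) then
      chars ++ PySem.List.pyRepeat [' '] (loc + (txt.toList.length : Int) - (chars.length : Int))
    else chars
  String.ofList (overlayGo chars txt.toList loc)

-- ===== PRECONDITION & SPEC =====
-- Pre_ excludes negative loc with non-empty txt, on which A still returns: A's value there comes from Python's
-- negative-slice clamping (an accident of the slicing implementation, meaningless as a placement), while B's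
-- natural list-index overlay raises IndexError or writes from the end; neither value is a specified behaviour.
def Pre_placeOn_py (txt : String) (base : String) (loc : Int) : Prop := 0 ≤ loc ∨ txt = ""
instance (txt : String) (base : String) (loc : Int) : Decidable (Pre_placeOn_py txt base loc) := by unfold Pre_placeOn_py; infer_instance

def pvWitness_placeOn_py : String × String × Int := ("ab", "xyz", 1)

def Spec_placeOn_py (txt : String) (base : String) (loc : Int) (out : String) : Prop := out = placeOn_py_alt txt base loc
instance (txt : String) (base : String) (loc : Int) (out : String) : Decidable (Spec_placeOn_py txt base loc out) := by unfold Spec_placeOn_py; infer_instance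

-- ===== CLAIM (what is proved, stated in full; the proofs are below) =====
def Claim_equal_placeOn_py : Prop := ∀ (txt : String) (base : String) (loc : Int), Dom_placeOn_py txt base loc → Pre_placeOn_py txt base loc → Spec_placeOn_py txt base loc (placeOn_py txt base loc)

-- ===== LEMMAS AND PROOFS =====

theorem chmerge_space (t : Char) : chmerge t ' ' = t := by
  unfold chmerge
  by_cases h : t = ' ' ∨ t = '_' <;> simp [h] <;> rcases h with h | h <;> simp [h]

theorem zipWith_chmerge_space (ts : List Char) :
    List.zipWith chmerge ts (List.replicate ts.length ' ') = ts := by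
  induction ts with
  | nil => rfl
  | cons t ts ih => simp [List.replicate_succ, ih, chmerge_space]

-- zipWith only looks at the first as.length elements of its second argument
theorem zipWith_congr_take {α β γ : Type} (f : α → β → γ) (as : List α) (bs cs : List β)
    (h : bs.take as.length = cs.take as.length) : List.zipWith f as bs = List.zipWith f as cs := by
  induction as generalizing bs cs with
  | nil => rfl
  | cons a as ih =>
    cases bs with
    | nil =>
      cases cs with
      | nil => rfl
      | cons c cs => simp at h
    | cons b bs =>
      cases cs with
      | nil => simp at h
      | cons c cs =>
        simp only [List.length_cons, List.take_succ_cons, List.cons.injEq] at h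
        simp [h.1, ih bs cs h.2]

-- the overlay loop rewrites the window [k, k+|ts|) of cs with chmerge
theorem overlayGo_eq (ts : List Char) (cs : List Char) (k : Nat)
    (h : k + ts.length ≤ cs.length) :
    overlayGo cs ts (k : Int) =
      cs.take k ++ List.zipWith chmerge ts (cs.drop k) ++ cs.drop (k + ts.length) := by
  induction ts generalizing cs k with
  | nil => simp [overlayGo]
  | cons t ts ih =>
    have hk : k < cs.length := by simp at h; omega
    have hset : pySetIdx cs (k : Int) (chmerge t (PySem.List.pyGetD cs (k : Int) ' '))
        = cs.set k (chmerge t (cs[k])) := by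
      simp [pySetIdx, PySem.List.pyGetD_natCast, List.getD_eq_getElem?_getD, hk]
    have hcast : (k : Int) + 1 = ((k + 1 : Nat) : Int) := by push_cast; ring
    have ih' := ih (cs.set k (chmerge t (cs[k]))) (k + 1)
      (by simp only [List.length_set]; simp at h ⊢; omega)
    rw [overlayGo, hset, hcast, ih']
    have hx : cs.set k (chmerge t (cs[k])) = cs.take k ++ chmerge t (cs[k]) :: cs.drop (k + 1) := by
      rw [List.set_eq_take_append_cons_drop, if_pos hk]
    have htk : (cs.take k).length = k := by simp; omega
    have c1 : (cs.set k (chmerge t (cs[k]))).take (k + 1) = cs.take k ++ [chmerge t (cs[k])] := by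
      rw [hx, List.take_append, htk, List.take_take,
        show min (k + 1) k = k from by omega, show k + 1 - k = 1 from by omega,
        List.take_cons, List.take_zero]
      omega
    have c2 : (cs.set k (chmerge t (cs[k]))).drop (k + 1) = cs.drop (k + 1) := by
      rw [hx, List.drop_append, htk, show k + 1 - k = 1 from by omega,
        List.drop_eq_nil_of_le (show (List.take k cs).length ≤ k + 1 from by omega),
        List.nil_append, List.drop_one, List.tail_cons]
    have c3 : (cs.set k (chmerge t (cs[k]))).drop (k + 1 + ts.length)
        = cs.drop (k + (t :: ts).length) := by
      rw [hx, List.drop_append, htk, show k + 1 + ts.length - k = ts.length + 1 from by omega,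
        List.drop_eq_nil_of_le (by omega), List.nil_append, List.drop_succ_cons, List.drop_drop]
      congr 1
      simp
      omega
    rw [c1, c2, c3]
    rw [show List.drop k cs = cs[k] :: List.drop (k + 1) cs from (List.getElem_cons_drop hk).symm,
      List.zipWith_cons_cons]
    simp [List.append_assoc]

theorem zip_map_chmerge (ts ys : List Char) :
    (ts.zip ys).map (fun p => chmerge p.1 p.2) = List.zipWith chmerge ts ys := by
  induction ts generalizing ys with
  | nil => simp
  | cons t ts ih => cases ys <;> simp [ih]

theorem main_eq (txt base : String) (k : Nat) :
    placeOn_py txt base (k : Int) = placeOn_py_alt txt base (k : Int) := by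
  unfold placeOn_py placeOn_py_alt
  dsimp only
  generalize txt.toList = ts
  generalize base.toList = bs
  by_cases hkn : ((bs.length : Int) < (k : Int))
  · -- loc > len(base): A concatenates; B pads and overlays onto spaces
    have hkn' : bs.length < k := by exact_mod_cast hkn
    have hpad : ((bs.length : Int) < (k : Int) + (ts.length : Int)) := by omega
    rw [if_pos (show (k : Int) > (bs.length : Int) from hkn), if_pos hpad]
    simp only [PySem.List.pyRepeat_singleton]
    rw [show ((k : Int) - (bs.length : Int)).toNat = k - bs.length from by omega,
      show ((k : Int) + (ts.length : Int) - (bs.length : Int)).toNat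
        = k + ts.length - bs.length from by omega]
    rw [overlayGo_eq ts _ k
      (by simp only [List.length_append, List.length_replicate]; omega)]
    have h1 : (bs ++ List.replicate (k + ts.length - bs.length) ' ').take k
        = bs ++ List.replicate (k - bs.length) ' ' := by
      rw [List.take_append, List.take_of_length_le (by omega), List.take_replicate]
      congr 2
      omega
    have h2 : (bs ++ List.replicate (k + ts.length - bs.length) ' ').drop k
        = List.replicate ts.length ' ' := by
      rw [List.drop_append, List.drop_eq_nil_of_le (by omega), List.drop_replicate, List.nil_append]
      congr 1
      omega
    have h3 : (bs ++ List.replicate (k + ts.length - bs.length) ' ').drop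
        (k + ts.length) = [] := by
      apply List.drop_eq_nil_of_le
      simp only [List.length_append, List.length_replicate]
      omega
    rw [h1, h2, h3, zipWith_chmerge_space]
    simp
  · -- loc <= len(base): A splits/merges/reassembles; B overlays in place
    have hkn' : k ≤ bs.length := by omega
    rw [if_neg (show ¬ ((k : Int) > (bs.length : Int)) from hkn)]
    rw [zip_map_chmerge, PySem.List.slice_to_natCast, PySem.List.slice_natCast_add,
      show (k : Int) + (ts.length : Int) = ((k + ts.length : Nat) : Int) from by
        push_cast; ring,
      PySem.List.slice_from_natCast]
    simp only [PySem.List.pyRepeat_singleton, Int.toNat_natCast]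
    by_cases hpad : ((bs.length : Int) < ((k + ts.length : Nat) : Int))
    · -- padding needed: k + |txt| > |base|
      have hpad' : bs.length < k + ts.length := by exact_mod_cast hpad
      rw [if_pos hpad]
      rw [show (((k + ts.length : Nat) : Int) - (bs.length : Int)).toNat
          = k + ts.length - bs.length from by omega]
      rw [overlayGo_eq ts _ k
        (by simp only [List.length_append, List.length_replicate]; omega)]
      have h1 : (bs ++ List.replicate (k + ts.length - bs.length) ' ').take k
          = bs.take k := by
        rw [List.take_append, show k - bs.length = 0 from by omega]
        simp
      have h3 : (bs ++ List.replicate (k + ts.length - bs.length) ' ').drop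
          (k + ts.length) = [] := by
        apply List.drop_eq_nil_of_le
        simp only [List.length_append, List.length_replicate]
        omega
      have h3' : bs.drop (k + ts.length) = [] :=
        List.drop_eq_nil_of_le (by omega)
      rw [h1, h3, h3']
      have hmerge : List.zipWith chmerge ts
            ((bs.drop k).take ts.length ++ List.replicate ts.length ' ')
          = List.zipWith chmerge ts
            ((bs ++ List.replicate (k + ts.length - bs.length) ' ').drop k) := by
        apply zipWith_congr_take
        apply List.ext_getElem?
        intro i
        simp [List.getElem?_take, List.getElem?_append, List.getElem?_drop,
          List.getElem?_replicate]
        split_ifs <;> first | rfl | omega | (exfalso; omega) | (congr 1 <;> omega)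
      rw [hmerge]
    · -- no padding: k + |txt| <= |base|
      have hpad' : bs.length ≥ k + ts.length := by
        have := hpad
        omega
      rw [if_neg hpad]
      rw [overlayGo_eq ts bs k (by omega)]
      have hmerge : List.zipWith chmerge ts
            ((bs.drop k).take ts.length ++ List.replicate ts.length ' ')
          = List.zipWith chmerge ts (bs.drop k) := by
        apply zipWith_congr_take
        apply List.ext_getElem?
        intro i
        simp [List.getElem?_take, List.getElem?_append, List.getElem?_drop,
          List.getElem?_replicate]
        split_ifs <;> first | rfl | omega | (exfalso; omega) | (congr 1 <;> omega)
      rw [hmerge]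

-- a python slice splits its list at the (clamped) cut point
theorem split_slice (bs : List Char) (loc : Int) :
    PySem.List.slice bs none (some loc) ++ PySem.List.slice bs (some loc) none = bs := by
  simp [PySem.List.slice, PySem.List.clampIdx]
  generalize (if loc < 0 then if (bs.length : Int) + loc < 0 then 0
      else ((bs.length : Int) + loc).toNat else min loc.toNat bs.length) = j
  rw [List.take_of_length_le (show (List.drop j bs).length ≤ bs.length - j from by simp)]
  exact List.take_append_drop j bs

-- with empty txt both programs return base unchanged, for every loc
theorem empty_eq (base : String) (loc : Int) (h : loc < 0) :
    placeOn_py "" base loc = placeOn_py_alt "" base loc := by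
  unfold placeOn_py placeOn_py_alt
  dsimp only
  rw [show ("" : String).toList = [] from rfl]
  rw [if_neg (show ¬ (loc > (base.toList.length : Int)) from by omega),
    if_neg (show ¬ ((base.toList.length : Int) < loc + (([] : List Char).length : Int)) from by
      simp
      omega)]
  simp only [List.length_nil, Int.natCast_zero, Int.add_zero, List.zip_nil_left, List.map_nil,
    List.append_nil, overlayGo]
  rw [split_slice]

-- ===== VERDICT (by name: the statement is the Claim_ definition above) =====
theorem placeOn_py_spec : Claim_equal_placeOn_py := by
  intro txt base loc _ hpre
  unfold Spec_placeOn_py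
  by_cases hl : 0 ≤ loc
  · obtain ⟨k, rfl⟩ : ∃ k : Nat, loc = (k : Int) := ⟨loc.toNat, (Int.toNat_of_nonneg hl).symm⟩
    exact main_eq txt base k
  · rcases hpre with hpre | rfl
    · exact absurd hpre hl
    · exact empty_eq base loc (by omega)
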